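-- pv_equiv track=rewrite | github.com/rachit-shah/ADBI-projects | Projects/Community Detection, Market Segmentation and Influence Propogation/sac1.py | rebase_clusters
-- ===== SOURCE A (Python) =====
-- def rebase_clusters(list):
--     #Dictionary to store mappings
--     newmapping = {}
--     #New community list after mapping is done
--     new_community_list = []
--     #start index from 0
--     count = 0
--     #store mapping to original vertices (before phase 1)
--     mapped_clusters = {}
--     for i in range(len(list)):
--         vertex = list[i]
--         if vertex in newmapping:
--             new_community_list.append(newmapping[vertex])
--             mapped_clusters[newmapping[vertex]].append(i)
--         else:
--             newmapping[vertex] = count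
--             new_community_list.append(count)
--             mapped_clusters[count] = [i]
--             count+=1
--     return new_community_list, mapped_clusters
-- ===== SOURCE B (Python) =====
-- def rebase_clusters(list):
--     # factorize: first-appearance order gives each distinct value its label
--     newmapping = {v: i for i, v in enumerate(dict.fromkeys(list))}
--     new_community_list = [newmapping[v] for v in list]
--     # invert: group positions by label
--     mapped_clusters = {}
--     for i, label in enumerate(new_community_list):
--         mapped_clusters.setdefault(label, []).append(i)
--     return new_community_list, mapped_clusters
-- ===== Notes on version B (the rewrite author's own statement) =====
-- stated objective: idiomatic
-- what changed: replaces the single fused loop maintaining four pieces of state by three separate passes: build the value-to-label table via dict.fromkeys factorization, map the list through it, then group indices by label with setdefault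
import Mathlib
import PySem

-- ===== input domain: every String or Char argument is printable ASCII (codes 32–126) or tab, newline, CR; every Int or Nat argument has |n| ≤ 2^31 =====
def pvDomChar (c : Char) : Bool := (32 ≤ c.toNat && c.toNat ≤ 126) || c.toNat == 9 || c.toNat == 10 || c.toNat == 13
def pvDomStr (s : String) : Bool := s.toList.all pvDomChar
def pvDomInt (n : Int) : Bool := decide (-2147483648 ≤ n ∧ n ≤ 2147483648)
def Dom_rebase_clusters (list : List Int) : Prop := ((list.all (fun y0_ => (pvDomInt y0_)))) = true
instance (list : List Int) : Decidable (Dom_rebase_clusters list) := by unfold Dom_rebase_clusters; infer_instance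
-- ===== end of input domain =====

-- B replaces A's single fused loop over four pieces of state by three separate passes
-- (factorize via dict.fromkeys, map through the table, group indices by label); objective: idiomatic.

-- ===== PORT A =====
-- one fused loop; state = (newmapping, new_community_list, count, mapped_clusters);
-- 'for i in range(len(list)): vertex = list[i]' visits exactly the pairs of enumerate(list);
-- 'mapped_clusters[lab].append(i)' is Dict.modify lab [] (· ++ [i]) — exact here since the key is present.
def rebase_clusters (list : List Int) : List Int × (List (Int × List Int)) :=
  let s := (PySem.List.enumerate list 0).foldl
    (fun (st : PySem.Dict Int Int × List Int × Int × PySem.Dict Int (List Int)) p =>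
      let nm := st.1; let ncl := st.2.1; let count := st.2.2.1; let mc := st.2.2.2
      let i := p.1; let vertex := p.2
      if nm.contains vertex then
        let lab := nm.getD vertex 0
        (nm, ncl ++ [lab], count, mc.modify lab [] (fun xs => xs ++ [i]))
      else
        (nm.insert vertex count, ncl ++ [count], count + 1, mc.insert count [i]))
    (PySem.Dict.empty, [], 0, PySem.Dict.empty)
  (s.2.1, s.2.2.2.items)

-- ===== PORT B =====
-- pass 1: {v: i for i, v in enumerate(dict.fromkeys(list))}
def altNm (l : List Int) : PySem.Dict Int Int :=
  (PySem.List.enumerate (PySem.List.dedup l) 0).foldl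
    (fun d p => d.insert p.2 p.1) PySem.Dict.empty
-- pass 2: [newmapping[v] for v in list] — the key is always present, so getD is exact
def altNcl (l : List Int) : List Int := l.map (fun v => (altNm l).getD v 0)
-- pass 3: mapped_clusters.setdefault(label, []).append(i) is Dict.modify label [] (· ++ [i])
def altMc (l : List Int) : PySem.Dict Int (List Int) :=
  (PySem.List.enumerate (altNcl l) 0).foldl
    (fun d p => d.modify p.2 [] (fun xs => xs ++ [p.1])) PySem.Dict.empty
def rebase_clusters_alt (list : List Int) : List Int × (List (Int × List Int)) :=
  (altNcl list, (altMc list).items)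

-- ===== PRECONDITION & SPEC =====
def Spec_rebase_clusters (list : List Int) (out : List Int × (List (Int × List Int))) : Prop := out = rebase_clusters_alt list
instance (list : List Int) (out : List Int × (List (Int × List Int))) : Decidable (Spec_rebase_clusters list out) := by unfold Spec_rebase_clusters; infer_instance

-- ===== CLAIM (what is proved, stated in full; the proofs are below) =====
def Claim_equal_rebase_clusters : Prop := ∀ (list : List Int), Dom_rebase_clusters list → Spec_rebase_clusters list (rebase_clusters list)

-- ===== LEMMAS AND PROOFS =====

theorem altNm_items (l : List Int) :
    (altNm l).items = (PySem.List.enumerate (PySem.List.dedup l) 0).map (fun p => (p.2, p.1)) := by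
  unfold altNm
  rw [PySem.Dict.items_foldl_insert_fresh]
  · simp [PySem.Dict.empty]
  · intro a _; exact PySem.Dict.contains_empty _
  · rw [PySem.List.map_snd_enumerate]; exact PySem.List.nodup_dedup l

theorem altNm_append_mem {l : List Int} {x : Int} (h : x ∈ l) :
    altNm (l ++ [x]) = altNm l := by
  unfold altNm
  rw [show PySem.List.dedup (l ++ [x]) = PySem.List.dedup l by
    simp [PySem.List.dedup_eq_ofList, PySem.Set.ofList_append_singleton, PySem.Set.add_of_mem, h]]

theorem altNm_append_not_mem {l : List Int} {x : Int} (h : x ∉ l) :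
    altNm (l ++ [x]) = (altNm l).insert x ((PySem.List.dedup l).length : Int) := by
  unfold altNm
  rw [show PySem.List.dedup (l ++ [x]) = PySem.List.dedup l ++ [x] by
    simp [PySem.List.dedup_eq_ofList, PySem.Set.ofList_append_singleton, PySem.Set.add_of_not_mem,
      PySem.Set.mem_ofList, h]]
  rw [PySem.List.enumerate_append, List.foldl_append]
  simp [PySem.List.enumerate]

theorem altNm_contains (l : List Int) (v : Int) :
    (altNm l).contains v = decide (v ∈ l) := by
  unfold altNm
  rw [PySem.Dict.contains_eq_decide_mem_keys,
    PySem.Dict.keys_foldl_insert_key (key := fun p : Int × Int => p.2)]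
  rw [PySem.List.map_snd_enumerate]
  simp [PySem.Dict.keys_empty, PySem.Set.update_nil_left, PySem.Set.mem_ofList]

theorem altNm_getD_lt {l : List Int} {v : Int} (h : v ∈ l) :
    (altNm l).getD v 0 < ((PySem.List.dedup l).length : Int) := by
  have hc : (altNm l).contains v = true := by rw [altNm_contains]; simpa
  rw [PySem.Dict.contains_eq_isSome_get?] at hc
  obtain ⟨w, hw⟩ := Option.isSome_iff_exists.mp hc
  have hm := PySem.Dict.mem_items_of_get?_eq_some _ hw
  rw [altNm_items] at hm
  obtain ⟨p, hp, hpe⟩ := List.mem_map.mp hm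
  obtain ⟨k, hk, rfl⟩ := (PySem.List.mem_enumerate_iff _ _ _).mp hp
  rw [PySem.Dict.getD_eq_get?_getD, hw]
  have hwk : w = (0 + k : Int) := by simpa using (congrArg Prod.snd hpe).symm
  subst hwk
  simpa using hk

theorem altNcl_append (l : List Int) (x : Int) :
    altNcl (l ++ [x]) = altNcl l ++ [(altNm (l ++ [x])).getD x 0] := by
  unfold altNcl
  rw [List.map_append]
  congr 1
  apply List.map_congr_left
  intro v hv
  by_cases hx : x ∈ l
  · rw [altNm_append_mem hx]
  · rw [altNm_append_not_mem hx, PySem.Dict.getD_insert_of_ne]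
    intro he; exact hx (he ▸ hv)

theorem altMc_contains (l : List Int) (c : Int) :
    (altMc l).contains c = decide (c ∈ altNcl l) := by
  unfold altMc
  rw [PySem.Dict.contains_eq_decide_mem_keys,
    PySem.Dict.keys_foldl_modify_key (key := fun p : Int × Int => p.2)]
  rw [PySem.List.map_snd_enumerate]
  simp [PySem.Dict.keys_empty, PySem.Set.update_nil_left, PySem.Set.mem_ofList]

theorem altMc_append (l : List Int) (x : Int) :
    altMc (l ++ [x]) = (altMc l).modify ((altNm (l ++ [x])).getD x 0) []
      (fun xs => xs ++ [(l.length : Int)]) := by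
  unfold altMc
  rw [altNcl_append, PySem.List.enumerate_append, List.foldl_append]
  simp [PySem.List.enumerate, altNcl]

theorem main_inv (l : List Int) :
    (PySem.List.enumerate l 0).foldl
      (fun (st : PySem.Dict Int Int × List Int × Int × PySem.Dict Int (List Int)) p =>
        let nm := st.1; let ncl := st.2.1; let count := st.2.2.1; let mc := st.2.2.2
        let i := p.1; let vertex := p.2
        if nm.contains vertex then
          let lab := nm.getD vertex 0
          (nm, ncl ++ [lab], count, mc.modify lab [] (fun xs => xs ++ [i]))
        else
          (nm.insert vertex count, ncl ++ [count], count + 1, mc.insert count [i]))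
      (PySem.Dict.empty, [], 0, PySem.Dict.empty)
    = (altNm l, altNcl l, ((PySem.List.dedup l).length : Int), altMc l) := by
  induction l using List.reverseRecOn with
  | nil => rfl
  | append_singleton l x ih =>
    rw [PySem.List.enumerate_append, List.foldl_append, ih]
    simp only [PySem.List.enumerate, List.foldl_cons, List.foldl_nil]
    by_cases hx : x ∈ l
    · rw [altNm_contains]
      simp only [hx, decide_true, if_true]
      rw [altNm_append_mem hx, altMc_append l x, altNm_append_mem hx, altNcl_append,
        altNm_append_mem hx]
      rw [show PySem.List.dedup (l ++ [x]) = PySem.List.dedup l by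
        simp [PySem.List.dedup_eq_ofList, PySem.Set.ofList_append_singleton, PySem.Set.add_of_mem, hx]]
      simp [altNcl]
    · rw [altNm_contains]
      simp only [hx, decide_false]
      rw [if_neg (by simp)]
      have hlen : PySem.List.dedup (l ++ [x]) = PySem.List.dedup l ++ [x] := by
        simp [PySem.List.dedup_eq_ofList, PySem.Set.ofList_append_singleton,
          PySem.Set.add_of_not_mem, PySem.Set.mem_ofList, hx]
      have hnotin : (altMc l).contains ((PySem.List.dedup l).length : Int) = false := by
        rw [altMc_contains]
        simp only [decide_eq_false_iff_not]
        intro hmem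
        obtain ⟨v, hv, hveq⟩ := List.mem_map.mp hmem
        exact absurd hveq (ne_of_lt (altNm_getD_lt hv))
      rw [altNm_append_not_mem hx, altMc_append l x, altNm_append_not_mem hx,
        PySem.Dict.getD_insert_self, altNcl_append, altNm_append_not_mem hx,
        PySem.Dict.getD_insert_self, hlen]
      refine Prod.ext rfl (Prod.ext ?_ (Prod.ext ?_ ?_))
      · simp [altNcl]
      · show ((PySem.List.dedup l).length : Int) + 1 = ((PySem.List.dedup l ++ [x]).length : Int)
        simp
      · show (altMc l).insert _ _ = (altMc l).insert _ (_ ++ _)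
        rw [PySem.Dict.getD_of_not_contains _ _ hnotin]
        simp

-- ===== VERDICT (by name: the statement is the Claim_ definition above) =====
theorem rebase_clusters_spec : Claim_equal_rebase_clusters := by
  intro list _
  unfold Spec_rebase_clusters rebase_clusters rebase_clusters_alt
  rw [main_inv]
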